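-- pv_equiv track=rewrite | github.com/mkhader96/Code-Challenges-and-Algorithms | python/code_challenges/hashtable/challenge02/challenge02.py | find_first_repeated_word
-- ===== SOURCE A (Python) =====
-- def find_first_repeated_word(string):
--     '''
--     A function that takes a string and then splits it to a list,the function also creates a hashset. Then we loop through the list, if the word is available in the set already then the word is repeated so we return the word, else if the word is not available then we add it to the set to check it again. If there is no repeated words then return "No Repetition"
--     '''
--     list = string.split()
--     hash = set()
--     for repeated_word in list:
--         if repeated_word in hash:
--             return repeated_word
--         else:
--             hash.add(repeated_word)
--     return 'No Repetition'
-- ===== SOURCE B (Python) =====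
-- def find_first_repeated_word(string):
--     words = string.split()
--     for i in range(len(words)):
--         for j in range(i):
--             if words[j] == words[i]:
--                 return words[i]
--     return 'No Repetition'
-- ===== Notes on version B (the rewrite author's own statement) =====
-- stated objective: alternative
-- what changed: Replaces the seen-set single pass with an explicit nested index loop that rescans the word prefix for each word, maintaining no auxiliary set.
import Mathlib
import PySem

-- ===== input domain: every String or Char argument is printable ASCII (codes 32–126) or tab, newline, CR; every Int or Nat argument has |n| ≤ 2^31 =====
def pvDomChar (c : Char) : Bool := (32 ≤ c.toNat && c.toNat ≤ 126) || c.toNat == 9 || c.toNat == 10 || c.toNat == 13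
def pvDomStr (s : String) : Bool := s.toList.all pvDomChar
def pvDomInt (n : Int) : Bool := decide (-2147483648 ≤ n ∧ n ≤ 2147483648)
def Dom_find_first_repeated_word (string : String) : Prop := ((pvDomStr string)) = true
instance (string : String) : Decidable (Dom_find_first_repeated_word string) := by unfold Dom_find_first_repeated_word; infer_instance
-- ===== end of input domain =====

-- B replaces A's seen-set single pass by a nested index loop rescanning the word prefix (alternative decomposition; not faster).

-- ===== PORT A =====
-- for repeated_word in list: if repeated_word in hash: return …; else hash.add(…)
def pvGoA : List String → PySem.Set String → String
  | [], _ => "No Repetition"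
  | w :: ws, h => if PySem.Set.contains h w then w else pvGoA ws (PySem.Set.add h w)

def find_first_repeated_word (string : String) : String :=
  pvGoA (PySem.Str.split₀ string) PySem.Set.empty

-- ===== PORT B =====
-- inner loop: for j in range(i): if words[j] == words[i]: …
def pvBInner (words : List String) (i : Nat) : Bool :=
  (List.range i).any (fun j => words.getD j "" == words.getD i "")

-- outer loop: for i in range(len(words)): …
def pvGoB (words : List String) : List Nat → String
  | [] => "No Repetition"
  | i :: is => if pvBInner words i then words.getD i "" else pvGoB words is

def find_first_repeated_word_alt (string : String) : String :=
  let words := PySem.Str.split₀ string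
  pvGoB words (List.range words.length)

-- ===== PRECONDITION & SPEC =====
def Spec_find_first_repeated_word (string : String) (out : String) : Prop := out = find_first_repeated_word_alt string
instance (string : String) (out : String) : Decidable (Spec_find_first_repeated_word string out) := by unfold Spec_find_first_repeated_word; infer_instance

-- ===== CLAIM (what is proved, stated in full; the proofs are below) =====
def Claim_equal_find_first_repeated_word : Prop := ∀ (string : String), Dom_find_first_repeated_word string → Spec_find_first_repeated_word string (find_first_repeated_word string)

-- ===== LEMMAS AND PROOFS =====

lemma pvBInner_eq (words : List String) (i : Nat) (hi : i < words.length) :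
    pvBInner words i = decide (words[i] ∈ words.take i) := by
  rw [Bool.eq_iff_iff]
  unfold pvBInner
  simp only [List.any_eq_true, List.mem_range, beq_iff_eq, decide_eq_true_eq,
    List.mem_take_iff_getElem]
  constructor
  · rintro ⟨j, hj, hjw⟩
    refine ⟨j, lt_min hj (hj.trans hi), ?_⟩
    rw [List.getD_eq_getElem _ _ (hj.trans hi), List.getD_eq_getElem _ _ hi] at hjw
    exact hjw
  · rintro ⟨j, hj, hjw⟩
    have hji : j < i := lt_of_lt_of_le hj (min_le_left _ _)
    refine ⟨j, hji, ?_⟩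
    rw [List.getD_eq_getElem _ _ (hji.trans hi), List.getD_eq_getElem _ _ hi]
    exact hjw

lemma pvMain (words : List String) : ∀ (rest : List String) (k : Nat) (seen : PySem.Set String),
    rest = words.drop k →
    (∀ w, PySem.Set.contains seen w = decide (w ∈ words.take k)) →
    pvGoA rest seen = pvGoB words (List.range' k rest.length) := by
  intro rest
  induction rest with
  | nil => intro k seen _ _; rfl
  | cons w ws ih =>
    intro k seen hdrop hseen
    have hk : k < words.length := by
      by_contra hge
      rw [List.drop_eq_nil_of_le (le_of_not_gt hge)] at hdrop
      simp at hdrop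
    rw [List.drop_eq_getElem_cons hk] at hdrop
    injection hdrop with hw hws
    have hrange : List.range' k (w :: ws).length = k :: List.range' (k + 1) ws.length := by
      simp [List.range'_succ]
    rw [hrange]
    simp only [pvGoA, pvGoB]
    have hcond : PySem.Set.contains seen w = pvBInner words k := by
      rw [hseen w, pvBInner_eq words k hk, hw]
    rw [← hcond]
    split_ifs with hc
    · rw [List.getD_eq_getElem _ _ hk, hw]
    · apply ih (k + 1) _ hws
      intro x
      have htake : words.take (k + 1) = words.take k ++ [w] := by
        rw [List.take_add_one, List.getElem?_eq_getElem hk, hw]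
        rfl
      rw [Bool.eq_iff_iff, PySem.Set.contains_iff, PySem.Set.mem_add _ _ _, htake,
        decide_eq_true_eq]
      simp only [List.mem_append, List.mem_singleton]
      constructor
      · rintro (hm | hm)
        · left
          have h1 : PySem.Set.contains seen x = true := (PySem.Set.contains_iff _ _).mpr hm
          rw [hseen x] at h1
          exact of_decide_eq_true h1
        · right; exact hm
      · rintro (hm | hm)
        · exact Or.inl ((PySem.Set.contains_iff _ _).mp (by rw [hseen x]; exact decide_eq_true hm))
        · exact Or.inr hm

-- ===== VERDICT (by name: the statement is the Claim_ definition above) =====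
theorem find_first_repeated_word_spec : Claim_equal_find_first_repeated_word := by
  intro s _
  show pvGoA (PySem.Str.split₀ s) PySem.Set.empty =
    pvGoB (PySem.Str.split₀ s) (List.range (PySem.Str.split₀ s).length)
  rw [List.range_eq_range']
  exact pvMain (PySem.Str.split₀ s) (PySem.Str.split₀ s) 0 PySem.Set.empty rfl
    (fun w => by simp [PySem.Set.empty, PySem.Set.contains])
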